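-- pv_equiv track=rewrite | github.com/j55blanchet/CS276-Artificial-Intelligence | pa4/map_coloring.py | _make_countrylist
-- ===== SOURCE A (Python) =====
-- from typing import Dict, Iterable, List, Tuple
--
-- Country = str
--
-- Border = Tuple[Country, Country]
--
-- def _make_countrylist(borders: List[Border], other_countries: List[Country]):
--         countries = set(other_countries)
--
--         for country1, country2 in borders:
--             countries.add(country1)
--             countries.add(country2)
--
--         countries = list(countries)
--         countries.sort()
--         return countries
-- ===== SOURCE B (Python) =====
-- from typing import List, Tuple
--
-- Country = str
-- Border = Tuple[Country, Country]
--
-- def _merge_unique(a, b):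
--     """Merge two strictly-sorted lists into one strictly-sorted list,
--     emitting a common element only once."""
--     result = []
--     i = 0
--     j = 0
--     while i < len(a) and j < len(b):
--         if a[i] < b[j]:
--             result.append(a[i])
--             i += 1
--         elif b[j] < a[i]:
--             result.append(b[j])
--             j += 1
--         else:
--             result.append(a[i])
--             i += 1
--             j += 1
--     result.extend(a[i:])
--     result.extend(b[j:])
--     return result
--
-- def _msort_unique(items):
--     """Mergesort whose merge drops duplicates: returns the sorted list of
--     distinct elements of items."""
--     if len(items) <= 1:
--         return list(items)
--     mid = len(items) // 2
--     return _merge_unique(_msort_unique(items[:mid]), _msort_unique(items[mid:]))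
--
-- def _make_countrylist(borders: List[Border], other_countries: List[Country]):
--     items = list(other_countries)
--     for country1, country2 in borders:
--         items.append(country1)
--         items.append(country2)
--     return _msort_unique(items)
-- ===== Notes on version B (the rewrite author's own statement) =====
-- stated objective: alternative
-- what changed: Replaces hash-set deduplication followed by a library sort with a hand-written mergesort whose merge step emits a common element only once, so sorting and deduplication happen in one recursive algorithm with no set and no sort call.
import Mathlib
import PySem

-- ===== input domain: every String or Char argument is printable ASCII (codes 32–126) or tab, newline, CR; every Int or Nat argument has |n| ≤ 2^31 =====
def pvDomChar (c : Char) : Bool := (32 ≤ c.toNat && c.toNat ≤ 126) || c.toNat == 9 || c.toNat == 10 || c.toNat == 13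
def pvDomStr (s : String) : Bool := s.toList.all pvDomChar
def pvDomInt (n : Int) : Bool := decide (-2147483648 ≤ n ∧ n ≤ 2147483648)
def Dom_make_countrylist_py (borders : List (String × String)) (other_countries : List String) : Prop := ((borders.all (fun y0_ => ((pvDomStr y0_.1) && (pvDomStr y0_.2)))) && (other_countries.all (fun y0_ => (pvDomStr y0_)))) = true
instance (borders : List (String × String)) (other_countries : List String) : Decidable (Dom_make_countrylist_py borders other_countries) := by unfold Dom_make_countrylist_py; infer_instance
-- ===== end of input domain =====

-- B uses no set and no sort call: a hand-written mergesort whose merge emits a common element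
-- only once sorts and deduplicates in one algorithm; objective: alternative (same result).

-- ===== PORT A =====
def make_countrylist_py (borders : List (String × String)) (other_countries : List String) : List String :=
  let countries : PySem.Set String := PySem.Set.ofList other_countries
  let countries := borders.foldl (fun s b => PySem.Set.add (PySem.Set.add s b.1) b.2) countries
  -- list(countries); countries.sort() — sorted without key: result independent of set iteration order
  PySem.List.sorted countries (fun x => x) false

-- ===== PORT B =====
-- port of Source B's _merge_unique: the while loop walks both lists, emitting the smaller head
-- (a common head once); the trailing extends are the remaining suffixes
def pvMergeUnique : List String → List String → List String
  | [], b => b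
  | a, [] => a
  | x :: xs, y :: ys =>
      if x < y then x :: pvMergeUnique xs (y :: ys)
      else if y < x then y :: pvMergeUnique (x :: xs) ys
      else x :: pvMergeUnique xs ys
termination_by a b => a.length + b.length

-- port of Source B's _msort_unique: split at the midpoint, recurse, duplicate-dropping merge
def pvMsortUnique (items : List String) : List String :=
  if items.length ≤ 1 then items
  else
    pvMergeUnique (pvMsortUnique (items.take (items.length / 2)))
                  (pvMsortUnique (items.drop (items.length / 2)))
termination_by items.length
decreasing_by
  · simp only [List.length_take]; omega
  · simp only [List.length_drop]; omega

def make_countrylist_py_alt (borders : List (String × String)) (other_countries : List String) : List String :=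
  let items := borders.foldl (fun acc b => acc ++ [b.1] ++ [b.2]) other_countries
  pvMsortUnique items

-- ===== PRECONDITION & SPEC =====
def Spec_make_countrylist_py (borders : List (String × String)) (other_countries : List String) (out : List String) : Prop := out = make_countrylist_py_alt borders other_countries
instance (borders : List (String × String)) (other_countries : List String) (out : List String) : Decidable (Spec_make_countrylist_py borders other_countries out) := by unfold Spec_make_countrylist_py; infer_instance

-- ===== CLAIM (what is proved, stated in full; the proofs are below) =====
def Claim_equal_make_countrylist_py : Prop := ∀ (borders : List (String × String)) (other_countries : List String), Dom_make_countrylist_py borders other_countries → Spec_make_countrylist_py borders other_countries (make_countrylist_py borders other_countries)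

-- ===== LEMMAS AND PROOFS =====

-- membership through the duplicate-dropping merge
theorem pv_mem_mergeUnique (x : String) (a b : List String) :
    x ∈ pvMergeUnique a b ↔ x ∈ a ∨ x ∈ b := by
  induction a, b using pvMergeUnique.induct with
  | case1 b => simp [pvMergeUnique]
  | case2 a h => cases a <;> simp [pvMergeUnique]
  | case3 p xs q ys h1 ih =>
      simp only [pvMergeUnique, if_pos h1, List.mem_cons, ih]
      tauto
  | case4 p xs q ys h1 h2 ih =>
      simp only [pvMergeUnique, if_neg h1, if_pos h2, List.mem_cons, ih]
      tauto
  | case5 p xs q ys h1 h2 ih =>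
      have hpq : p = q := le_antisymm (not_lt.mp h2) (not_lt.mp h1)
      subst hpq
      simp only [pvMergeUnique, if_neg h1, if_neg h2, List.mem_cons, ih]
      tauto

-- the merge of two strictly sorted lists is strictly sorted
theorem pv_pairwise_mergeUnique (a b : List String)
    (ha : a.Pairwise (· < ·)) (hb : b.Pairwise (· < ·)) :
    (pvMergeUnique a b).Pairwise (· < ·) := by
  induction a, b using pvMergeUnique.induct with
  | case1 b => simpa [pvMergeUnique] using hb
  | case2 a h => cases a <;> simpa [pvMergeUnique] using ha
  | case3 p xs q ys h1 ih =>
      have ha' := List.pairwise_cons.mp ha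
      simp only [pvMergeUnique, if_pos h1]
      refine List.pairwise_cons.mpr ⟨?_, ih ha'.2 hb⟩
      intro z hz
      rcases (pv_mem_mergeUnique z xs (q :: ys)).mp hz with h | h
      · exact ha'.1 z h
      · rcases List.mem_cons.mp h with rfl | h'
        · exact h1
        · exact lt_trans h1 ((List.pairwise_cons.mp hb).1 z h')
  | case4 p xs q ys h1 h2 ih =>
      have hb' := List.pairwise_cons.mp hb
      simp only [pvMergeUnique, if_neg h1, if_pos h2]
      refine List.pairwise_cons.mpr ⟨?_, ih ha hb'.2⟩
      intro z hz
      rcases (pv_mem_mergeUnique z (p :: xs) ys).mp hz with h | h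
      · rcases List.mem_cons.mp h with rfl | h'
        · exact h2
        · exact lt_trans h2 ((List.pairwise_cons.mp ha).1 z h')
      · exact hb'.1 z h
  | case5 p xs q ys h1 h2 ih =>
      have hpq : p = q := le_antisymm (not_lt.mp h2) (not_lt.mp h1)
      have ha' := List.pairwise_cons.mp ha
      have hb' := List.pairwise_cons.mp hb
      simp only [pvMergeUnique, if_neg h1, if_neg h2]
      refine List.pairwise_cons.mpr ⟨?_, ih ha'.2 hb'.2⟩
      intro z hz
      rcases (pv_mem_mergeUnique z xs ys).mp hz with h | h
      · exact ha'.1 z h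
      · exact hpq ▸ hb'.1 z h

-- mergesort-with-dedup returns a strictly sorted list with the same members
theorem pv_msortUnique_invariant (items : List String) :
    (pvMsortUnique items).Pairwise (· < ·) ∧ (∀ x, x ∈ pvMsortUnique items ↔ x ∈ items) := by
  induction items using pvMsortUnique.induct with
  | case1 items h =>
      rw [pvMsortUnique, if_pos h]
      match items, h with
      | [], _ => exact ⟨List.Pairwise.nil, fun x => Iff.rfl⟩
      | [a], _ => exact ⟨List.pairwise_singleton _ _, fun x => Iff.rfl⟩
  | case2 items h ih1 ih2 =>
      rw [pvMsortUnique, if_neg h]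
      refine ⟨pv_pairwise_mergeUnique _ _ ih1.1 ih2.1, fun x => ?_⟩
      rw [pv_mem_mergeUnique, ih1.2 x, ih2.2 x, ← List.mem_append, List.take_append_drop]

-- membership in B's flat accumulation
theorem pv_mem_items (borders : List (String × String)) (acc : List String) (x : String) :
    x ∈ borders.foldl (fun acc b => acc ++ [b.1] ++ [b.2]) acc ↔
    x ∈ acc ∨ ∃ b ∈ borders, x = b.1 ∨ x = b.2 := by
  induction borders generalizing acc with
  | nil => simp
  | cons b t ih =>
      rw [List.foldl_cons, ih]
      simp only [List.mem_append, List.mem_singleton, List.mem_cons]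
      aesop

-- membership in A's set fold
theorem pv_mem_setfold (borders : List (String × String)) (s : PySem.Set String) (x : String) :
    x ∈ borders.foldl (fun s b => PySem.Set.add (PySem.Set.add s b.1) b.2) s ↔
    x ∈ s ∨ ∃ b ∈ borders, x = b.1 ∨ x = b.2 := by
  induction borders generalizing s with
  | nil => simp
  | cons b t ih =>
      rw [List.foldl_cons, ih]
      simp only [PySem.Set.mem_add]
      aesop

-- A's set fold has no duplicates
theorem pv_nodup_setfold (borders : List (String × String)) (s : PySem.Set String) (hs : s.Nodup) :
    (borders.foldl (fun s b => PySem.Set.add (PySem.Set.add s b.1) b.2) s).Nodup := by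
  induction borders generalizing s with
  | nil => exact hs
  | cons b t ih => exact ih _ (PySem.Set.nodup_add _ b.2 (PySem.Set.nodup_add _ b.1 hs))

-- ===== VERDICT (by name: the statement is the Claim_ definition above) =====
theorem make_countrylist_py_spec : Claim_equal_make_countrylist_py := by
  intro borders other_countries _
  unfold Spec_make_countrylist_py make_countrylist_py make_countrylist_py_alt
  simp only []
  set setA := borders.foldl (fun s b => PySem.Set.add (PySem.Set.add s b.1) b.2) (PySem.Set.ofList other_countries) with hsetA
  obtain ⟨hp, hm⟩ := pv_msortUnique_invariant (borders.foldl (fun acc b => acc ++ [b.1] ++ [b.2]) other_countries)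
  have hnodupA : setA.Nodup := pv_nodup_setfold borders _ (PySem.Set.nodup_ofList other_countries)
  have hperm : (pvMsortUnique (borders.foldl (fun acc b => acc ++ [b.1] ++ [b.2]) other_countries)).Perm setA := by
    refine (List.perm_ext_iff_of_nodup (hp.imp ne_of_lt) hnodupA).mpr ?_
    intro a
    rw [hm a, pv_mem_items, pv_mem_setfold]
    simp [PySem.Set.mem_ofList]
  exact PySem.List.sorted_eq_of_perm_of_pairwise_lt _ _ _ hperm hp
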